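-- pv_equiv track=rewrite | github.com/shhuan1989/algorithms | codeforces/731A.py | step
-- ===== SOURCE A (Python) =====
-- A = [chr(ord('a') + i) for i in range(26)]
--
-- def step(pos, t):
--     a = 0
--     i = pos
--     while A[i] != t:
--         i = (i+1) % 26
--         a += 1
--
--     b = 0
--     i = pos
--     while A[i] != t:
--         i = (i-1+26) % 26
--         b += 1
--
--     return min(a, b)
-- ===== SOURCE B (Python) =====
-- def step(pos, t):
--     d = (ord(t) - ord('a') - pos) % 26
--     return min(d, 26 - d)
-- ===== Notes on version B (the rewrite author's own statement) =====
-- stated objective: simpler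
-- what changed: Replaced both directional search loops over the 26-letter wheel by a single closed-form modular computation: d = (ord(t)-ord('a')-pos) % 26, answer min(d, 26-d).
-- crash fix: On pos outside [-26, 26) with t a single character, A raises IndexError (list index out of range) while B returns min(d, 26-d) for d = (ord(t)-97-pos) % 26, e.g. 4 at (30, 'a'). — e.g. on step(30, "a"): A raises IndexError, B returns 4
import Mathlib
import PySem

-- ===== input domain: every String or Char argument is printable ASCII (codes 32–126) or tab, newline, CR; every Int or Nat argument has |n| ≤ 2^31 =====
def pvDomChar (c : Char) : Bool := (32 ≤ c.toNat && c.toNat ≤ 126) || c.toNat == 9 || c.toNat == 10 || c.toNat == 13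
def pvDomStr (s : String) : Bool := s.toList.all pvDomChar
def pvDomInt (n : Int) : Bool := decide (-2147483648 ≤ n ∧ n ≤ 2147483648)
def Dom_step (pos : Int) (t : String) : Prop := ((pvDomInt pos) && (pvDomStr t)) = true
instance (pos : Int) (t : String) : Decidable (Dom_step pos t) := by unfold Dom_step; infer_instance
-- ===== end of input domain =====

set_option maxRecDepth 4000


-- B replaces A's two directional while-loops on the 26-letter wheel by the closed form
-- min((j - pos) % 26, 26 - (j - pos) % 26) — objective: simpler.

-- ===== PORT A =====
-- module-level constant A = [chr(ord('a') + i) for i in range(26)]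
def pyA : List String := (List.range 26).map (fun i => String.ofList [Char.ofNat (97 + i)])

-- 'while A[i] != t: i = (i+1) % 26; a += 1' — fuel 27 only makes the loop total
-- (inside Pre_ it terminates in ≤ 25 steps); pyGet? none = Python IndexError (outside Pre_).
def stepFwd (t : String) : Nat → Int → Int → Int
  | 0, _, a => a
  | fuel+1, i, a =>
    match PySem.List.pyGet? pyA i with
    | none => a
    | some c => if c ≠ t then stepFwd t fuel (PySem.Int.mod (i+1) 26) (a+1) else a

-- 'while A[i] != t: i = (i-1+26) % 26; b += 1'
def stepBwd (t : String) : Nat → Int → Int → Int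
  | 0, _, b => b
  | fuel+1, i, b =>
    match PySem.List.pyGet? pyA i with
    | none => b
    | some c => if c ≠ t then stepBwd t fuel (PySem.Int.mod (i-1+26) 26) (b+1) else b

def step (pos : Int) (t : String) : Int :=
  min (stepFwd t 27 pos 0) (stepBwd t 27 pos 0)

-- ===== PORT B =====
def step_alt (pos : Int) (t : String) : Int :=
  -- ord(t): t is a single character inside Pre_ (Python raises TypeError otherwise)
  let o : Int := match t.toList with | [c] => (c.toNat : Int) | _ => 0
  let d := PySem.Int.mod (o - 97 - pos) 26
  min d (26 - d)

-- ===== PRECONDITION & SPEC =====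
-- the 26 lowercase-letter strings: exactly the values of t on which A's while-loops terminate
def lowerLetters : List String :=
  ["a","b","c","d","e","f","g","h","i","j","k","l","m",
   "n","o","p","q","r","s","t","u","v","w","x","y","z"]

-- Pre_ excludes pos outside the valid index range [-26, 26) (A raises IndexError there)
-- and t that is not one of the 26 lowercase-letter strings (A's while-loops never terminate there).
def Pre_step (pos : Int) (t : String) : Prop :=
  (-26 ≤ pos ∧ pos < 26) ∧ t ∈ lowerLetters
instance (pos : Int) (t : String) : Decidable (Pre_step pos t) := by unfold Pre_step; infer_instance

def pvWitness_step : Int × String := (-26, "a")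

-- On pos outside [-26, 26) with t a single character, A raises IndexError while B
-- returns the modular circular distance min(d, 26-d) for d = (ord(t)-97-pos) % 26.
def Raises_step (pos : Int) (t : String) : Prop :=
  (pos < -26 ∨ 26 ≤ pos) ∧ t.toList.length = 1
instance (pos : Int) (t : String) : Decidable (Raises_step pos t) := by unfold Raises_step; infer_instance
def pvRaiseWitness_step : Int × String := (30, "a")
def pvRaiseWitnessOut_step : Int := 4

def Spec_step (pos : Int) (t : String) (out : Int) : Prop := out = step_alt pos t
instance (pos : Int) (t : String) (out : Int) : Decidable (Spec_step pos t out) := by unfold Spec_step; infer_instance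

-- ===== CLAIM (what is proved, stated in full; the proofs are below) =====
def Claim_equal_step : Prop := ∀ (pos : Int) (t : String), Dom_step pos t → Pre_step pos t → Spec_step pos t (step pos t)
def Claim_raises_step : Prop := (∀ (pos : Int) (t : String), Dom_step pos t → Raises_step pos t → ¬ Pre_step pos t) ∧ (Dom_step (pvRaiseWitness_step.1) (pvRaiseWitness_step.2) ∧ Raises_step (pvRaiseWitness_step.1) (pvRaiseWitness_step.2) ∧ step_alt (pvRaiseWitness_step.1) (pvRaiseWitness_step.2) = pvRaiseWitnessOut_step)

-- ===== LEMMAS AND PROOFS =====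

-- each member of lowerLetters is a single character with code in [97, 122]
theorem letters_shape :
    ∀ s ∈ lowerLetters,
      s.toList.length = 1 ∧ s.toList.all (fun c => 97 ≤ c.toNat && c.toNat ≤ 122) = true := by
  decide

-- the finite check over all 52 admissible positions and 26 letters
theorem step_finite_check :
    ∀ (k : Fin 52) (j : Fin 26),
      step ((k : Int) - 26) (String.ofList [Char.ofNat (97 + (j : Nat))])
        = step_alt ((k : Int) - 26) (String.ofList [Char.ofNat (97 + (j : Nat))]) := by
  decide

-- ===== VERDICT (by name: the statement is the Claim_ definition above) =====
theorem step_spec : Claim_equal_step := by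
  intro pos t _ hpre
  obtain ⟨⟨h1, h2⟩, hmem⟩ := hpre
  obtain ⟨hlen, hall⟩ := letters_shape t hmem
  unfold Spec_step
  obtain ⟨c, ht⟩ : ∃ c, t.toList = [c] := by
    match h : t.toList with
    | [c] => exact ⟨c, rfl⟩
    | [] => rw [h] at hlen; simp at hlen
    | c1 :: c2 :: rest => rw [h] at hlen; simp at hlen
  simp only [List.all_eq_true] at hall
  obtain ⟨hc1, hc2⟩ : 97 ≤ c.toNat ∧ c.toNat ≤ 122 := by
    have := hall c (by rw [ht]; simp)
    simpa using this
  have hk : ∃ k : Fin 52, pos = (k : Int) - 26 :=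
    ⟨⟨(pos + 26).toNat, by omega⟩, by simp; omega⟩
  have hj : ∃ j : Fin 26, c = Char.ofNat (97 + (j : Nat)) := by
    refine ⟨⟨c.toNat - 97, by omega⟩, ?_⟩
    have : 97 + (c.toNat - 97) = c.toNat := by omega
    simp [this, Char.ofNat_toNat]
  obtain ⟨k, hk⟩ := hk
  obtain ⟨j, hj⟩ := hj
  have hts : t = String.ofList [Char.ofNat (97 + (j : Nat))] := by
    rw [← hj, ← ht]
    exact (String.ofList_toList).symm
  rw [hk, hts]
  exact step_finite_check k j

@[simp]
theorem step_raises : Claim_raises_step := by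
  unfold Claim_raises_step
  constructor
  · intro pos t _ hr hp
    obtain ⟨hr1, _⟩ := hr
    obtain ⟨⟨h1, h2⟩, _⟩ := hp
    omega
  · refine ⟨by decide, by decide, by decide⟩
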